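-- pv_equiv track=rewrite | github.com/alkink/ocrreader | ocrreader/field_postprocess.py | _fix_vin
-- ===== SOURCE A (Python) =====
-- _VIN_CHAR_MAP: dict[str, str] = {
--     "O": "0",
--     "Q": "0",
-- }
--
-- def _fix_vin(s: str) -> str:
--     """
--     VIN / Şase no için karakter düzeltme.
--     VIN standardı: 17 karakter, I/O/Q yasak.
--     WMI (pos 0-2): harf ağırlıklı — dokunma.
--     VDS (pos 3-8) + VIS (pos 9-16): karışık — agresif düzelt.
--     """
--     s = s.upper().strip()
--     result = list(s)
--     for i, c in enumerate(result):
--         if i < 3: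
--             # WMI: sadece O→0 güvenli
--             if c == "O":
--                 result[i] = "0"
--         else:
--             if c in _VIN_CHAR_MAP:
--                 result[i] = _VIN_CHAR_MAP[c]
--             elif c == "I":
--                 result[i] = "1"  # pos 3+ → I hep 1
--     return "".join(result)
-- ===== SOURCE B (Python) =====
-- _T_HEAD = str.maketrans({"O": "0"})
-- _T_TAIL = str.maketrans({"O": "0", "Q": "0", "I": "1"})
--
--
-- def _fix_vin(s: str) -> str:
--     s = s.upper().strip()
--     return s[:3].translate(_T_HEAD) + s[3:].translate(_T_TAIL)
-- ===== Notes on version B (the rewrite author's own statement) =====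
-- stated objective: faster
-- what changed: Replaces the indexed mutate-in-place loop with its i<3 branch by slicing the string into WMI head and VDS+VIS tail and applying two str.maketrans translation tables segment-wise.
import Mathlib
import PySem

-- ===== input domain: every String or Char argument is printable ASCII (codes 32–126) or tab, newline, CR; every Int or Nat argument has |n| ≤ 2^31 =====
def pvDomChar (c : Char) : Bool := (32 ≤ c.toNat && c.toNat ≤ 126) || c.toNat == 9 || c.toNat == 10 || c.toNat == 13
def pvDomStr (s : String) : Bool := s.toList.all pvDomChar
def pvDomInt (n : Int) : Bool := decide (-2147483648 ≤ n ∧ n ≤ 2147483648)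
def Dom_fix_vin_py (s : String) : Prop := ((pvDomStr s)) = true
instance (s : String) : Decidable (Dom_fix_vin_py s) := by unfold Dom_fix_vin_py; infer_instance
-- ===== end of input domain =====

-- B replaces A's indexed mutate-in-place loop by slicing into head (first 3) and tail and
-- applying a translation table to each segment (measured constant-factor speedup via str.translate).

-- ===== PORT A =====
-- _VIN_CHAR_MAP, keys/values are 1-char strings, ported at the Char level
def pvVinMap : PySem.Dict Char Char := PySem.Dict.ofList [('O', '0'), ('Q', '0')]

-- one loop iteration: result[i] assignments become List.set (i from enumerate is ≥ 0)
def pvStepA (r : List Char) (ic : Int × Char) : List Char :=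
  if ic.1 < 3 then
    if ic.2 = 'O' then r.set ic.1.toNat '0' else r
  else
    if pvVinMap.contains ic.2 then r.set ic.1.toNat (pvVinMap.getD ic.2 ic.2)
    else if ic.2 = 'I' then r.set ic.1.toNat '1' else r

def fix_vin_py (s : String) : String :=
  let t := PySem.Str.strip (PySem.Str.upper s)
  let result := t.toList
  String.ofList ((PySem.List.enumerate result 0).foldl pvStepA result)

-- ===== PORT B =====
-- the two str.maketrans tables, as Char translations
def pvTransHead (c : Char) : Char := if c = 'O' then '0' else c
def pvTransTail (c : Char) : Char :=
  if c = 'O' then '0' else if c = 'Q' then '0' else if c = 'I' then '1' else c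

def fix_vin_py_alt (s : String) : String :=
  let t := (PySem.Str.strip (PySem.Str.upper s)).toList
  String.ofList ((PySem.Chars.slice t none (some 3)).map pvTransHead
             ++ (PySem.Chars.slice t (some 3) none).map pvTransTail)

-- ===== PRECONDITION & SPEC =====
def Spec_fix_vin_py (s : String) (out : String) : Prop := out = fix_vin_py_alt s
instance (s : String) (out : String) : Decidable (Spec_fix_vin_py s out) := by unfold Spec_fix_vin_py; infer_instance

-- ===== CLAIM (what is proved, stated in full; the proofs are below) =====
def Claim_equal_fix_vin_py : Prop := ∀ (s : String), Dom_fix_vin_py s → Spec_fix_vin_py s (fix_vin_py s)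

-- ===== LEMMAS AND PROOFS =====

-- what one loop step writes at position n, as a pure function of the position and the character
def pvF (n : Nat) (c : Char) : Char := if n < 3 then pvTransHead c else pvTransTail c

def pvMapF (n : Nat) : List Char → List Char
  | [] => []
  | c :: cs => pvF n c :: pvMapF (n + 1) cs

theorem pv_vinMap_eq : pvVinMap = PySem.Dict.mk [('O', '0'), ('Q', '0')] := by decide

theorem pv_contains_vinMap (c : Char) : pvVinMap.contains c = (c == 'O' || c == 'Q') := by
  rw [pv_vinMap_eq]; simp [PySem.Dict.contains_mk, BEq.comm]

theorem pv_stepA_eq (pre : List Char) (c : Char) (cs : List Char) :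
    pvStepA (pre ++ c :: cs) ((pre.length : Int), c) = pre ++ pvF pre.length c :: cs := by
  unfold pvStepA pvF pvTransHead pvTransTail
  simp only [Int.toNat_natCast]
  rcases Nat.lt_or_ge pre.length 3 with h3 | h3
  · rw [if_pos (by exact_mod_cast h3), if_pos h3]
    by_cases hc : c = 'O'
    · subst hc; simp
    · simp [hc]
  · rw [if_neg (by exact_mod_cast Nat.not_lt.mpr h3), if_neg (Nat.not_lt.mpr h3)]
    rw [pv_contains_vinMap]
    by_cases hO : c = 'O'
    · subst hO
      simp [show pvVinMap.getD 'O' 'O' = '0' from by decide]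
    · by_cases hQ : c = 'Q'
      · subst hQ
        simp [show pvVinMap.getD 'Q' 'Q' = '0' from by decide]
      · by_cases hI : c = 'I'
        · subst hI; simp
        · simp [hO, hQ, hI]

theorem pv_foldl_stepA (cs : List Char) : ∀ (pre : List Char),
    (PySem.List.enumerate cs (pre.length : Int)).foldl pvStepA (pre ++ cs)
      = pre ++ pvMapF pre.length cs := by
  induction cs with
  | nil => intro pre; simp [PySem.List.enumerate_nil, pvMapF]
  | cons c cs ih =>
    intro pre
    rw [PySem.List.enumerate_cons, List.foldl_cons, pv_stepA_eq]
    have h1 := ih (pre ++ [pvF pre.length c])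
    simp only [List.length_append, List.length_cons, List.length_nil] at h1
    simp only [List.append_assoc, List.singleton_append] at h1
    have : ((pre.length : Int) + 1) = ((pre.length + 1 : Nat) : Int) := by push_cast; ring
    rw [this, h1, pvMapF]

theorem pv_mapF_eq (cs : List Char) : ∀ (n : Nat),
    pvMapF n cs = (cs.take (3 - n)).map pvTransHead ++ (cs.drop (3 - n)).map pvTransTail := by
  induction cs with
  | nil => intro n; simp [pvMapF]
  | cons c cs ih =>
    intro n
    rcases Nat.lt_or_ge n 3 with h | h
    · have h3 : 3 - n = (3 - (n + 1)) + 1 := by omega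
      rw [pvMapF, ih (n + 1), h3]
      simp [pvF, h]
    · have h3 : 3 - n = 0 := by omega
      have h4 : 3 - (n + 1) = 0 := by omega
      rw [pvMapF, ih (n + 1), h3, h4]
      simp [pvF, Nat.not_lt.mpr h]

-- ===== VERDICT (by name: the statement is the Claim_ definition above) =====
theorem fix_vin_py_spec : Claim_equal_fix_vin_py := by
  intro s _
  unfold Spec_fix_vin_py fix_vin_py fix_vin_py_alt
  have h := pv_foldl_stepA (PySem.Str.strip (PySem.Str.upper s)).toList []
  simp only [List.length_nil, Nat.cast_zero, List.nil_append] at h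
  dsimp only
  rw [h, pv_mapF_eq]
  simp [PySem.Chars.slice_eq_listSlice, PySem.List.slice_to, PySem.List.slice_from]
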